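-- pv_equiv track=rewrite | github.com/bjarkemoensted/adventofcode | 2016/solution22.py | get_viable_pairs
-- ===== SOURCE A (Python) =====
-- def get_viable_pairs(used_arr, size_arr):
--     """Takes arrays representing used and total space at each node.
--     Returns a list of pairs of coordinates [((i1, j1), (i2, j2)), ...] representing 'viable pairs' of nodes.
--     Nodes that are not viable are the 'wall nodes'."""
--
--     res = []
--     for crd_a, used_a in _iterate_crd_and_vals(used_arr):
--         for crd_b, used_b in _iterate_crd_and_vals(used_arr):
--             ib, jb = crd_b
--             avail = size_arr[ib][jb] - used_b
--             if crd_a == crd_b: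
--                 continue
--             if used_a == 0:
--                 continue
--             fits = used_a <= avail
--             if fits:
--                 res.append((crd_a, crd_b))
--             #
--         #
--
--     return res
--
-- def _iterate_crd_and_vals(arr: list|tuple):
--     """Given a 2d array, iterates over coordinate, value pairs like (i, j), val."""
--     for i, row in enumerate(arr):
--         for j, val in enumerate(row):
--             yield (i, j), val
-- ===== SOURCE B (Python) =====
-- def get_viable_pairs(used_arr, size_arr):
--     """Flatten once into (coord, used, avail) nodes, then reuse a memo of
--     qualifying-target lists keyed by the used value (equal thresholds share one scan)."""
--     nodes = [((i, j), u, size_arr[i][j] - u)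
--              for i, row in enumerate(used_arr)
--              for j, u in enumerate(row)]
--     res = []
--     memo = {}
--     for crd_a, used_a, _ in nodes:
--         if used_a == 0:
--             continue
--         if used_a not in memo:
--             memo[used_a] = [crd for crd, _, av in nodes if used_a <= av]
--         for crd_b in memo[used_a]:
--             if crd_b != crd_a:
--                 res.append((crd_a, crd_b))
--     return res
-- ===== Notes on version B (the rewrite author's own statement) =====
-- stated objective: alternative
-- what changed: B flattens the grid once into (coord, used, avail) nodes (computing each avail a single time) and memoizes, in a dict keyed by the used value, the index-ordered list of qualifying targets, so equal thresholds share one scan instead of A's full nested rescan with avail recomputed per pair.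
import Mathlib
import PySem

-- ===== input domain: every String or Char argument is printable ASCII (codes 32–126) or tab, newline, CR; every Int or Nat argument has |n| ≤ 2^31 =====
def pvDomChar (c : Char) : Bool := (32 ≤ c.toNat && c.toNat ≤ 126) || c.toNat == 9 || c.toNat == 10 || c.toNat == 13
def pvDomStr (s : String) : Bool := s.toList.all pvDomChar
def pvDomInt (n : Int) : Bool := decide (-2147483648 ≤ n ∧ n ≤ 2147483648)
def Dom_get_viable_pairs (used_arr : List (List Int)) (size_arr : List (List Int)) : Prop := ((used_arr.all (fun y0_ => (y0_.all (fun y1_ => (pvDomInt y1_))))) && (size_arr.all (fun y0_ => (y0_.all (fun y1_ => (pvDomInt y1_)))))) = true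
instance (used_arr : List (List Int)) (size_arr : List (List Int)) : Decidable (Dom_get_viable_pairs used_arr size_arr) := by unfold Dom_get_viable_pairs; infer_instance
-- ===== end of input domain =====

-- B memoizes per-used-value target lists over a once-flattened node list instead of A's nested rescans; return-value equivalence, no mutation.

-- ===== PORT A =====
-- size_arr[ib][jb] (total, raises → Pre_); shared by both ports since B's node list stores the same expression
def pvAvail (size_arr : List (List Int)) (c : Int × Int) : Int :=
  PySem.List.pyGetD (PySem.List.pyGetD size_arr c.1 []) c.2 0

-- _iterate_crd_and_vals : yields ((i, j), val) over a 2d array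
def pvIterCV (arr : List (List Int)) : List ((Int × Int) × Int) :=
  (PySem.List.enumerate arr).flatMap (fun p =>
    (PySem.List.enumerate p.2).map (fun q => ((p.1, q.1), q.2)))

def get_viable_pairs (used_arr : List (List Int)) (size_arr : List (List Int)) : List ((Int × Int) × (Int × Int)) :=
  (pvIterCV used_arr).foldl (fun res a =>
    (pvIterCV used_arr).foldl (fun res b =>
      let avail := pvAvail size_arr b.1 - b.2
      if a.1 = b.1 then res
      else if a.2 = 0 then res
      else if a.2 ≤ avail then res ++ [(a.1, b.1)] else res) res) []

-- ===== PORT B =====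
-- the flattened node list [((i,j), u, size[i][j]-u), ...]
def pvNodes (used_arr : List (List Int)) (size_arr : List (List Int)) : List ((Int × Int) × Int × Int) :=
  (PySem.List.enumerate used_arr).flatMap (fun p =>
    (PySem.List.enumerate p.2).map (fun q => ((p.1, q.1), q.2, pvAvail size_arr (p.1, q.1) - q.2)))

def get_viable_pairs_alt (used_arr : List (List Int)) (size_arr : List (List Int)) : List ((Int × Int) × (Int × Int)) :=
  let nodes := pvNodes used_arr size_arr
  (nodes.foldl (fun st n =>
    if n.2.1 = 0 then st
    else
      let memo := if st.2.contains n.2.1 then st.2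
                  else st.2.insert n.2.1 ((nodes.filter (fun b => n.2.1 ≤ b.2.2)).map (fun b => b.1))
      ((memo.getD n.2.1 []).foldl (fun r c => if c ≠ n.1 then r ++ [(n.1, c)] else r) st.1, memo))
    (([] : List ((Int × Int) × (Int × Int))), (PySem.Dict.empty : PySem.Dict Int (List (Int × Int))))).1

-- ===== PRECONDITION & SPEC =====
-- Pre_: exactly where Python A returns (size_arr must cover every nonempty row of used_arr, else A raises IndexError)
def Pre_get_viable_pairs (used_arr : List (List Int)) (size_arr : List (List Int)) : Prop :=
  ∀ i ∈ List.range used_arr.length,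
    (used_arr.getD i []).length = 0 ∨
      (i < size_arr.length ∧ (used_arr.getD i []).length ≤ (size_arr.getD i []).length)
instance (used_arr : List (List Int)) (size_arr : List (List Int)) : Decidable (Pre_get_viable_pairs used_arr size_arr) := by unfold Pre_get_viable_pairs; infer_instance

def pvWitness_get_viable_pairs : List (List Int) × List (List Int) := ([[0, 5], [3]], [[8, 8], [8]])

def Spec_get_viable_pairs (used_arr : List (List Int)) (size_arr : List (List Int)) (out : List ((Int × Int) × (Int × Int))) : Prop := out = get_viable_pairs_alt used_arr size_arr
instance (used_arr : List (List Int)) (size_arr : List (List Int)) (out : List ((Int × Int) × (Int × Int))) : Decidable (Spec_get_viable_pairs used_arr size_arr out) := by unfold Spec_get_viable_pairs; infer_instance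

-- ===== CLAIM (what is proved, stated in full; the proofs are below) =====
def Claim_equal_get_viable_pairs : Prop := ∀ (used_arr : List (List Int)) (size_arr : List (List Int)), Dom_get_viable_pairs used_arr size_arr → Pre_get_viable_pairs used_arr size_arr → Spec_get_viable_pairs used_arr size_arr (get_viable_pairs used_arr size_arr)

-- ===== LEMMAS AND PROOFS =====

-- the qualifying-target list B memoizes for threshold t
def pvQual (used_arr size_arr : List (List Int)) (t : Int) : List (Int × Int) :=
  ((pvNodes used_arr size_arr).filter (fun b => t ≤ b.2.2)).map (fun b => b.1)

-- A's inner loop in closed form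
lemma pvInnerA (size_arr : List (List Int)) (a : (Int × Int) × Int) :
    ∀ (l : List ((Int × Int) × Int)) (res : List ((Int × Int) × (Int × Int))),
      l.foldl (fun res b =>
        let avail := pvAvail size_arr b.1 - b.2
        if a.1 = b.1 then res
        else if a.2 = 0 then res
        else if a.2 ≤ avail then res ++ [(a.1, b.1)] else res) res
      = res ++ (l.filter (fun b => decide (a.1 ≠ b.1 ∧ a.2 ≠ 0 ∧ a.2 ≤ pvAvail size_arr b.1 - b.2))).map
            (fun b => (a.1, b.1)) := by
  intro l
  induction l with
  | nil => intro res; simp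
  | cons b l ih =>
    intro res
    simp only [List.foldl_cons]
    rw [ih]
    by_cases h1 : a.1 = b.1
    · simp [h1]
    · by_cases h2 : a.2 = 0
      · simp [h1, h2]
      · by_cases h3 : a.2 ≤ pvAvail size_arr b.1 - b.2
        · simp [h1, h2, h3]
        · simp [h1, h2, h3]

-- B's inner loop in closed form
lemma pvInnerB (a1 : Int × Int) :
    ∀ (cs : List (Int × Int)) (res : List ((Int × Int) × (Int × Int))),
      cs.foldl (fun r c => if c ≠ a1 then r ++ [(a1, c)] else r) res
      = res ++ (cs.filter (fun c => decide (c ≠ a1))).map (fun c => (a1, c)) := by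
  intro cs
  induction cs with
  | nil => intro res; simp
  | cons c cs ih =>
    intro res
    simp only [List.foldl_cons]
    rw [ih]
    by_cases h : c = a1 <;> simp [h]

-- invariant: every memoized entry is the qualifying list for its key
def pvInv (used_arr size_arr : List (List Int)) (memo : PySem.Dict Int (List (Int × Int))) : Prop :=
  ∀ k, memo.contains k = true → memo.getD k [] = pvQual used_arr size_arr k

-- B's main loop in closed form, under the memo invariant (step written with the
-- memo-if duplicated; definitionally equal to the port's let-form)
lemma pvFoldB (used_arr size_arr : List (List Int)) :
    ∀ (l : List ((Int × Int) × Int × Int)) (res : List ((Int × Int) × (Int × Int)))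
      (memo : PySem.Dict Int (List (Int × Int))), pvInv used_arr size_arr memo →
      (l.foldl (fun st n =>
        if n.2.1 = 0 then st
        else
          (((if st.2.contains n.2.1 then st.2
             else st.2.insert n.2.1 (((pvNodes used_arr size_arr).filter (fun b => n.2.1 ≤ b.2.2)).map (fun b => b.1))).getD n.2.1 []).foldl
              (fun r c => if c ≠ n.1 then r ++ [(n.1, c)] else r) st.1,
           if st.2.contains n.2.1 then st.2
           else st.2.insert n.2.1 (((pvNodes used_arr size_arr).filter (fun b => n.2.1 ≤ b.2.2)).map (fun b => b.1))))
        (res, memo)).1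
      = res ++ l.flatMap (fun n =>
          if n.2.1 = 0 then []
          else ((pvQual used_arr size_arr n.2.1).filter (fun c => decide (c ≠ n.1))).map (fun c => (n.1, c))) := by
  intro l
  induction l with
  | nil => intro res memo _; simp
  | cons n l ih =>
    intro res memo hinv
    simp only [List.foldl_cons]
    by_cases h0 : n.2.1 = 0
    · rw [if_pos h0, ih res memo hinv]
      simp [h0]
    · rw [if_neg h0]
      by_cases hc : memo.contains n.2.1 = true
      · rw [if_pos hc, ih _ memo hinv, pvInnerB, hinv n.2.1 hc]
        simp [h0, List.append_assoc]
      · have hcf : ¬ (memo.contains n.2.1 = true) := hc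
        rw [if_neg hcf]
        have hinv' : pvInv used_arr size_arr
            (memo.insert n.2.1 (((pvNodes used_arr size_arr).filter (fun b => n.2.1 ≤ b.2.2)).map (fun b => b.1))) := by
          intro k hk
          by_cases hkeq : k = n.2.1
          · subst hkeq
            rw [PySem.Dict.getD_insert_self]
            rfl
          · rw [PySem.Dict.getD_insert_of_ne (hne := hkeq)]
            apply hinv
            rw [PySem.Dict.contains_insert] at hk
            simpa [hkeq] using hk
        rw [ih _ _ hinv', pvInnerB, PySem.Dict.getD_insert_self]
        have hq : ((pvNodes used_arr size_arr).filter (fun b => n.2.1 ≤ b.2.2)).map (fun b => b.1)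
            = pvQual used_arr size_arr n.2.1 := rfl
        rw [hq]
        simp [h0, List.append_assoc]

-- nodes are the iterated pairs annotated with avail
lemma pvNodes_eq_map (used_arr size_arr : List (List Int)) :
    pvNodes used_arr size_arr
      = (pvIterCV used_arr).map (fun a => (a.1, a.2, pvAvail size_arr a.1 - a.2)) := by
  simp only [pvNodes, pvIterCV, List.map_flatMap, List.map_map]
  rfl

-- per-source equality of the two closed forms, element by element
lemma pvPointwiseAux (size_arr : List (List Int)) (a : (Int × Int) × Int) (h0 : a.2 ≠ 0) :
    ∀ l : List ((Int × Int) × Int),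
      ((((l.map (fun a => (a.1, a.2, pvAvail size_arr a.1 - a.2))).filter
          (fun b => a.2 ≤ b.2.2)).map (fun b => b.1)).filter (fun c => decide (c ≠ a.1))).map
        (fun c => (a.1, c))
      = (l.filter (fun b => decide (a.1 ≠ b.1 ∧ a.2 ≠ 0 ∧ a.2 ≤ pvAvail size_arr b.1 - b.2))).map
          (fun b => (a.1, b.1)) := by
  intro l
  induction l with
  | nil => simp
  | cons b l ih =>
    simp only [List.map_cons, List.filter_cons]
    by_cases h1 : b.1 = a.1
    · have h1' : ¬ a.1 ≠ b.1 := fun h => h h1.symm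
      by_cases h2 : a.2 ≤ pvAvail size_arr b.1 - b.2 <;> simp [h0, h1', h2] <;> (try simp [h1]) <;> simpa [h0] using ih
    · have h1' : a.1 ≠ b.1 := fun h => h1 h.symm
      by_cases h2 : a.2 ≤ pvAvail size_arr b.1 - b.2 <;> simpa [h0, h1, h1', h2] using ih

-- per-source equality of the two closed forms
lemma pvPointwise (used_arr size_arr : List (List Int)) (a : (Int × Int) × Int) :
    (if a.2 = 0 then []
     else ((pvQual used_arr size_arr a.2).filter (fun c => decide (c ≠ a.1))).map (fun c => (a.1, c)))
    = ((pvIterCV used_arr).filter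
        (fun b => decide (a.1 ≠ b.1 ∧ a.2 ≠ 0 ∧ a.2 ≤ pvAvail size_arr b.1 - b.2))).map
        (fun b => (a.1, b.1)) := by
  by_cases h0 : a.2 = 0
  · simp [h0]
  · rw [if_neg h0]
    unfold pvQual
    rw [pvNodes_eq_map]
    exact pvPointwiseAux size_arr a h0 (pvIterCV used_arr)

-- ===== VERDICT (by name: the statement is the Claim_ definition above) =====
theorem get_viable_pairs_spec : Claim_equal_get_viable_pairs := by
  intro used_arr size_arr _ _
  unfold Spec_get_viable_pairs
  have hA : get_viable_pairs used_arr size_arr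
      = (pvIterCV used_arr).flatMap (fun a =>
          ((pvIterCV used_arr).filter
            (fun b => decide (a.1 ≠ b.1 ∧ a.2 ≠ 0 ∧ a.2 ≤ pvAvail size_arr b.1 - b.2))).map
            (fun b => (a.1, b.1))) := by
    unfold get_viable_pairs
    have h1 : (fun (res : List ((Int × Int) × (Int × Int))) (a : (Int × Int) × Int) =>
        (pvIterCV used_arr).foldl (fun res b =>
          let avail := pvAvail size_arr b.1 - b.2
          if a.1 = b.1 then res else if a.2 = 0 then res
          else if a.2 ≤ avail then res ++ [(a.1, b.1)] else res) res)
        = fun res a => res ++ ((pvIterCV used_arr).filter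
            (fun b => decide (a.1 ≠ b.1 ∧ a.2 ≠ 0 ∧ a.2 ≤ pvAvail size_arr b.1 - b.2))).map
            (fun b => (a.1, b.1)) := by
      funext res a
      exact pvInnerA size_arr a _ res
    rw [h1, PySem.List.foldl_append_eq_flatMap]
    simp
  have hB : get_viable_pairs_alt used_arr size_arr
      = (pvNodes used_arr size_arr).flatMap (fun n =>
          if n.2.1 = 0 then []
          else ((pvQual used_arr size_arr n.2.1).filter (fun c => decide (c ≠ n.1))).map
            (fun c => (n.1, c))) := by
    have hinv0 : pvInv used_arr size_arr (PySem.Dict.empty : PySem.Dict Int (List (Int × Int))) := by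
      intro k hk
      simp [PySem.Dict.contains_empty] at hk
    have h2 := pvFoldB used_arr size_arr (pvNodes used_arr size_arr) [] PySem.Dict.empty hinv0
    calc get_viable_pairs_alt used_arr size_arr
        = (((pvNodes used_arr size_arr).foldl (fun st n =>
            if n.2.1 = 0 then st
            else
              (((if st.2.contains n.2.1 then st.2
                 else st.2.insert n.2.1 (((pvNodes used_arr size_arr).filter (fun b => n.2.1 ≤ b.2.2)).map (fun b => b.1))).getD n.2.1 []).foldl
                  (fun r c => if c ≠ n.1 then r ++ [(n.1, c)] else r) st.1,
               if st.2.contains n.2.1 then st.2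
               else st.2.insert n.2.1 (((pvNodes used_arr size_arr).filter (fun b => n.2.1 ≤ b.2.2)).map (fun b => b.1))))
            (([] : List ((Int × Int) × (Int × Int))), (PySem.Dict.empty : PySem.Dict Int (List (Int × Int))))).1) := rfl
      _ = _ := by rw [h2]; simp
  rw [hA, hB, pvNodes_eq_map, List.flatMap_map]
  refine (List.flatMap_congr ?_).symm
  intro a _
  exact pvPointwise used_arr size_arr a
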